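-- pv_equiv track=rewrite | github.com/MrBrantCode/unitest_baseline | mut_generate/mist_train_taco/taco_8958/solution.py | max_possible_sum
-- ===== SOURCE A (Python) =====
-- import math
--
-- def consec(a):
--     tot = 0
--     big = float('inf')
--     neg = 0
--     for guy in a:
--         tot += abs(guy)
--         if abs(guy) < big:
--             big = abs(guy)
--         if guy < 0:
--             neg += 1
--     if neg % 2 == 0:
--         return (tot, tot - 2 * big)
--     return (tot - 2 * big, tot)
--
-- def max_possible_sum(a, B):
--     n = len(a)
--     m = len(B)
--     g = B[0]
--     for i in range(1, m):
--         g = math.gcd(g, B[i])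
--     if g == 1:
--         return sum((abs(guy) for guy in a))
--
--     tot = 0
--     tot1 = 0
--     for i in range(g):
--         guy = []
--         j = i
--         while j < n:
--             guy.append(a[j])
--             j += g
--         (x, y) = consec(guy)
--         tot += x
--         tot1 += y
--
--     return max(tot, tot1)
-- ===== SOURCE B (Python) =====
-- import math
--
-- def max_possible_sum(a, B):
--     g = B[0]
--     for b in B[1:]:
--         g = math.gcd(g, b)
--     S = sum(abs(x) for x in a)
--     if g == 1:
--         return S
--     # one pass over a: per residue class keep only (min |x|, parity of negatives)
--     stats = {}
--     for idx, x in enumerate(a):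
--         r = idx % g
--         if r in stats:
--             mn, par = stats[r]
--             stats[r] = (min(mn, abs(x)), par ^ (x < 0))
--         else:
--             stats[r] = (abs(x), x < 0)
--     pen_odd = 0
--     pen_even = 0
--     for mn, par in stats.values():
--         if par:
--             pen_odd += mn
--         else:
--             pen_even += mn
--     # an empty residue class (g > len(a)) forces keeping every sign flip count even
--     if g > len(a):
--         return S - 2 * pen_odd
--     return S - 2 * min(pen_odd, pen_even)
-- ===== Notes on version B (the rewrite author's own statement) =====
-- stated objective: alternative
-- what changed: A builds each residue class as a list by stride loops and sums, per class, a (keep, flip-one) pair of totals, maxing the two grand totals at the end; B computes the global sum of absolute values once, makes a single enumerate pass keeping only (min |x|, negative-count parity) per class in a dict, folds the dict values into two penalty sums (odd-parity mins vs even-parity mins), and returns S - 2*min(pen_odd, pen_even) in closed form (S - 2*pen_odd when some class is empty).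
-- outside the precondition, e.g. on max_possible_sum([1, 2], [-3]): A returns 0, B returns 3; on max_possible_sum([1], [0]): A returns 0, B raises ZeroDivisionError
import Mathlib
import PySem

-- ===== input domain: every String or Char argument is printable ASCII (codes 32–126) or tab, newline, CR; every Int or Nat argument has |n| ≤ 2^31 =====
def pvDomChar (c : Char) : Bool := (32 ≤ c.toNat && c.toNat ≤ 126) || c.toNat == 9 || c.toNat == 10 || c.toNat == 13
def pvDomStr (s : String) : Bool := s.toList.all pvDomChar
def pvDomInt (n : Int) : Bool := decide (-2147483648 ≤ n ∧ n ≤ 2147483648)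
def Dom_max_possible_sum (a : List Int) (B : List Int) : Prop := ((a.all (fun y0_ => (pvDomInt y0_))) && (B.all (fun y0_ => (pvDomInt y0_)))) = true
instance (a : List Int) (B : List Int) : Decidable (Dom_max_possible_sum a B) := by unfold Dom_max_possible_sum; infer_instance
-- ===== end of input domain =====

-- B replaces A's per-class list building, per-class (keep, flip-one) pairs and the final
-- max of two running totals by: one global sum of |x|, a single enumerate pass keeping only
-- (min |x|, negative-count parity) per residue class in a dict, and the closed form
-- S - 2*min(pen_odd, pen_even) over the two penalty sums (alternative decomposition).

-- ===== PORT A =====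

-- helper `consec`: fold state is (tot, big, neg); big = none plays float('inf').
-- In Python's odd-neg branch big is always finite (the list is nonempty), so `.getD 0` is
-- never reached; the even branch's `tot - 2*inf = -inf` is `none` in the second component.
def consecA (l : List Int) : Int × Option Int :=
  let s := l.foldl (fun (st : Int × Option Int × Int) guy =>
    (st.1 + |guy|,
     (match st.2.1 with
      | none => some |guy|
      | some b => if |guy| < b then some |guy| else some b),
     st.2.2 + (if guy < 0 then 1 else 0))) (0, none, 0)
  if s.2.2 % 2 == 0 then (s.1, (s.2.1).map (fun b => s.1 - 2 * b))
  else (s.1 - 2 * (s.2.1).getD 0, some s.1)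

-- the inner `while j < n: guy.append(a[j]); j += g`; A only runs it with 0 < g
-- (i ranges over range(g)), so the `0 < g` conjunct is purely a totality guard
def gatherA (a : List Int) (g : Int) (j : Int) : List Int :=
  if h : j < (a.length : Int) ∧ 0 < g then
    PySem.List.pyGetD a j 0 :: gatherA a g (j + g)
  else []
termination_by ((a.length : Int) - j).toNat
decreasing_by omega

-- tot1 can become -inf (`none`) through an empty residue class; adding keeps it -inf
def max_possible_sum (a : List Int) (B : List Int) : Int :=
  let n : Int := PySem.List.len a
  let m : Int := PySem.List.len B
  let g0 : Int := PySem.List.pyGetD B 0 0   -- B[0]; IndexError on empty B is excluded by Pre_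
  let g : Int := (PySem.List.pyRange 1 m 1).foldl
    (fun g i => (Int.gcd g (PySem.List.pyGetD B i 0) : Int)) g0
  if g == 1 then a.foldl (fun s guy => s + |guy|) 0
  else
    let p := (PySem.List.pyRange 0 g 1).foldl (fun (st : Int × Option Int) i =>
      let xy := consecA (gatherA a g i)
      (st.1 + xy.1, st.2.bind (fun t => xy.2.map (fun y => t + y)))) ((0 : Int), some (0 : Int))
    match p.2 with
    | none => p.1
    | some t1 => max p.1 t1

-- ===== PORT B =====

def max_possible_sum_alt (a : List Int) (B : List Int) : Int :=
  let g : Int := B.tail.foldl (fun g b => (Int.gcd g b : Int)) (B.headD 0)  -- B[0] then gcd over B[1:]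
  let S : Int := a.foldl (fun s x => s + |x|) 0
  if g == 1 then S
  else
    -- stats : dict residue -> (min |x| of the class, parity of its negative count)
    let stats : PySem.Dict Int (Int × Bool) := (PySem.List.enumerate a 0).foldl
      (fun (stats : PySem.Dict Int (Int × Bool)) (ix : Int × Int) =>
        let r := PySem.Int.mod ix.1 g
        match PySem.Dict.get? stats r with
        | some mp => PySem.Dict.insert stats r ((min mp.1 |ix.2| : Int), xor mp.2 (decide (ix.2 < 0)))
        | none => PySem.Dict.insert stats r ((|ix.2| : Int), decide (ix.2 < 0)))
      PySem.Dict.empty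
    let p := (PySem.Dict.values stats).foldl
      (fun (p : Int × Int) mp => if mp.2 then (p.1 + mp.1, p.2) else (p.1, p.2 + mp.1))
      ((0 : Int), (0 : Int))
    if g > PySem.List.len a then S - 2 * p.1 else S - 2 * min p.1 p.2

-- ===== PRECONDITION & SPEC =====
-- Pre_ excludes empty B, where A raises IndexError, and inputs with nonempty a whose
-- gcd-fold g is nonpositive (a single nonpositive element, or an all-zero B): a degenerate
-- corner where A's range(g) loop is accidentally empty (returning 0) while B's bucketing
-- pass takes Python's nonpositive modulus (raising ZeroDivisionError when g = 0).
def Pre_max_possible_sum (a : List Int) (B : List Int) : Prop :=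
  B ≠ [] ∧ (a = [] ∨ ¬((B.length = 1 ∧ B.headD 0 ≤ 0) ∨ ∀ x ∈ B, x = 0))
instance (a : List Int) (B : List Int) : Decidable (Pre_max_possible_sum a B) := by
  unfold Pre_max_possible_sum; infer_instance

def pvWitness_max_possible_sum : List Int × List Int := ([1, -2, 3, -4, 5], [2, 4])

def Spec_max_possible_sum (a : List Int) (B : List Int) (out : Int) : Prop := out = max_possible_sum_alt a B
instance (a : List Int) (B : List Int) (out : Int) : Decidable (Spec_max_possible_sum a B out) := by unfold Spec_max_possible_sum; infer_instance

-- ===== CLAIM (what is proved, stated in full; the proofs are below) =====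
def Claim_equal_max_possible_sum : Prop := ∀ (a : List Int) (B : List Int), Dom_max_possible_sum a B → Pre_max_possible_sum a B → Spec_max_possible_sum a B (max_possible_sum a B)

-- ===== LEMMAS AND PROOFS =====

-- ---- the two ports compute the same g ----
def gcdFold (B : List Int) : Int := B.tail.foldl (fun g b => (Int.gcd g b : Int)) (B.headD 0)

theorem gcdFold_A (B : List Int) :
    (PySem.List.pyRange 1 (PySem.List.len B) 1).foldl
      (fun g i => (Int.gcd g (PySem.List.pyGetD B i 0) : Int)) (PySem.List.pyGetD B 0 0)
    = gcdFold B := by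
  rw [PySem.List.foldl_pyRange_pyGetD B 0 (fun g b => (Int.gcd g b : Int)) _ (by omega : (0:Int) ≤ 1)]
  cases B <;> simp [gcdFold, PySem.List.pyGetD, PySem.List.pyGet?, PySem.List.pyIdx?]

theorem gcdFold_eq_zero_iff (t : List Int) (i : Int) :
    t.foldl (fun g b => (Int.gcd g b : Int)) i = 0 ↔ (i = 0 ∧ ∀ x ∈ t, x = 0) := by
  induction t generalizing i with
  | nil => simp
  | cons b t ih =>
      simp only [List.foldl_cons, ih, Int.natCast_eq_zero, Int.gcd_eq_zero_iff, List.mem_cons]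
      constructor
      · rintro ⟨⟨hi, hb⟩, h⟩; exact ⟨hi, fun x hx => hx.elim (fun h' => h' ▸ hb) (h x)⟩
      · rintro ⟨hi, h⟩; exact ⟨⟨hi, h b (.inl rfl)⟩, fun x hx => h x (.inr hx)⟩

theorem gcdFold_nonneg (t : List Int) (i : Int) (hi : 0 ≤ i) :
    0 ≤ t.foldl (fun g b => (Int.gcd g b : Int)) i := by
  induction t generalizing i with
  | nil => exact hi
  | cons b t ih => exact ih _ (Int.natCast_nonneg _)

theorem gcdFold_pos (B : List Int) (hB : B ≠ [])
    (h : ¬((B.length = 1 ∧ B.headD 0 ≤ 0) ∨ ∀ x ∈ B, x = 0)) : 0 < gcdFold B := by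
  push Not at h
  obtain ⟨h1, x0, hx0, hx0ne⟩ := h
  match B, hB with
  | [b], _ => simpa [gcdFold] using h1 rfl
  | b :: c :: t, _ =>
      have hnn : 0 ≤ gcdFold (b :: c :: t) :=
        gcdFold_nonneg t _ (Int.natCast_nonneg _)
      have hne : gcdFold (b :: c :: t) ≠ 0 := by
        rw [gcdFold]
        simp only [List.tail_cons, List.headD_cons]
        rw [Ne, gcdFold_eq_zero_iff]
        rintro ⟨hb0, hall⟩
        simp only [List.mem_cons] at hx0
        rcases hx0 with h' | h'
        · exact hx0ne (h' ▸ hb0)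
        · exact hx0ne (hall x0 (List.mem_cons.2 h'))
      omega

-- ---- A-side per-class statistics: (sum of |x|, min |x|, negative count) ----
def bstep (st : Option (Int × Int × Int)) (x : Int) : Option (Int × Int × Int) :=
  match st with
  | none => some (|x|, |x|, if x < 0 then 1 else 0)
  | some (t, mn, neg) => some (t + |x|, min mn |x|, neg + (if x < 0 then 1 else 0))

def absStat (l : List Int) : Option (Int × Int × Int) := l.foldl bstep none

def combineA (st : Option (Int × Int × Int)) : Int × Option Int :=
  match st with
  | none => (0, none)
  | some (t, mn, neg) => if neg % 2 == 0 then (t, some (t - 2 * mn)) else (t - 2 * mn, some t)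

def toA (st : Option (Int × Int × Int)) : Int × Option Int × Int :=
  match st with
  | none => (0, none, 0)
  | some (t, mn, neg) => (t, some mn, neg)

theorem consec_fold_eq (l : List Int) (st : Option (Int × Int × Int)) :
    l.foldl (fun (st : Int × Option Int × Int) guy =>
      (st.1 + |guy|,
       (match st.2.1 with
        | none => some |guy|
        | some b => if |guy| < b then some |guy| else some b),
       st.2.2 + (if guy < 0 then 1 else 0))) (toA st)
    = toA (l.foldl bstep st) := by
  induction l generalizing st with
  | nil => rfl
  | cons x l ih =>
      have hstep : ∀ st, (fun (st : Int × Option Int × Int) guy =>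
          ((st.1 + |guy| : Int),
           (match st.2.1 with
            | none => some |guy|
            | some b => if |guy| < b then some |guy| else some b),
           (st.2.2 + (if guy < 0 then 1 else 0) : Int))) (toA st) x = toA (bstep st x) := by
        intro st
        match st with
        | none => simp [toA, bstep]
        | some (t, mn, neg) =>
            simp only [toA, bstep]
            refine Prod.ext rfl (Prod.ext ?_ rfl)
            simp only
            split_ifs with h <;> simp <;> omega
      simpa [hstep st] using ih (bstep st x)

theorem consecA_eq (l : List Int) : consecA l = combineA (absStat l) := by
  have h0 : ((0 : Int), (none : Option Int), (0 : Int)) = toA none := rfl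
  rw [consecA, absStat]
  rw [h0, consec_fold_eq]
  rcases l.foldl bstep none with _ | ⟨t, mn, ng⟩ <;> simp [toA, combineA]

theorem gather_big (a : List Int) (g j : Int) (h : (a.length : Int) ≤ j) : gatherA a g j = [] := by
  rw [gatherA]; rw [dif_neg (by omega)]

theorem gather_append (a : List Int) (x g : Int) (hg : 0 < g) (j : Int) (hj : 0 ≤ j) :
    gatherA (a ++ [x]) g j
    = gatherA a g j ++ (if j ≤ (a.length : Int) ∧ g ∣ ((a.length : Int) - j) then [x] else []) := by
  by_cases h1 : j < (a.length : Int)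
  · conv_lhs => rw [gatherA]
    conv_rhs => rw [gatherA]
    rw [dif_pos (by simp only [List.length_append, List.length_cons, List.length_nil]; push_cast; constructor <;> omega), dif_pos ⟨h1, hg⟩]
    have hget : PySem.List.pyGetD (a ++ [x]) j 0 = PySem.List.pyGetD a j 0 := by
      rw [PySem.List.pyGetD_eq_getElem _ _ hj (by simp only [List.length_append, List.length_cons, List.length_nil]; push_cast; omega),
          PySem.List.pyGetD_eq_getElem _ _ hj (by omega)]
      exact List.getElem_append_left (by omega)
    rw [hget, gather_append a x g hg (j + g) (by omega), List.cons_append]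
    congr 2
    by_cases hd : g ∣ ((a.length : Int) - j)
    · have hd' : g ∣ ((a.length : Int) - (j + g)) := by
        obtain ⟨c, hc⟩ := hd; exact ⟨c - 1, by linarith [hc]⟩
      have hge : g ≤ (a.length : Int) - j := by
        rcases hd with ⟨c, hc⟩
        have : 1 ≤ c := by nlinarith
        nlinarith
      rw [if_pos ⟨by omega, hd'⟩, if_pos ⟨by omega, hd⟩]
    · have hd' : ¬ g ∣ ((a.length : Int) - (j + g)) := by
        intro ⟨c, hc⟩; exact hd ⟨c + 1, by linarith⟩
      rw [if_neg (by tauto), if_neg (by tauto)]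
  · by_cases h2 : j = (a.length : Int)
    · subst h2
      conv_lhs => rw [gatherA]
      rw [dif_pos ⟨by simp only [List.length_append, List.length_cons, List.length_nil]; push_cast; omega, hg⟩]
      conv_lhs => rw [gatherA]
      rw [dif_neg (by simp only [List.length_append, List.length_cons, List.length_nil]; push_cast; omega)]
      conv_rhs => rw [gatherA]
      rw [dif_neg (by omega)]
      rw [if_pos ⟨le_refl _, by simp⟩]
      congr 1
      rw [PySem.List.pyGetD_eq_getElem _ _ (by omega) (by simp only [List.length_append, List.length_cons, List.length_nil]; push_cast; omega), List.getElem_append_right (by omega)]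
      simp
    · conv_lhs => rw [gatherA]
      conv_rhs => rw [gatherA]
      rw [dif_neg (by simp only [List.length_append, List.length_cons, List.length_nil]; push_cast; omega), dif_neg (by omega), if_neg (by omega)]
      rfl
termination_by ((a.length : Int) + 1 - j).toNat
decreasing_by omega

theorem mod_cond_iff (gN len r : Nat) (hg : 0 < gN) (hr : r < gN) :
    ((r : Int) ≤ (len : Int) ∧ (gN : Int) ∣ ((len : Int) - (r : Int))) ↔ r = len % gN := by
  constructor
  · rintro ⟨hle, c, hc⟩
    have hc' : (len : Int) = gN * c + r := by linarith
    have hcnn : 0 ≤ c := by nlinarith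
    have h2 : (len : Int) = ((gN * c.toNat + r : Nat) : Int) := by
      push_cast; rw [Int.toNat_of_nonneg hcnn]; linarith
    have h3 : len = gN * c.toNat + r := by exact_mod_cast h2
    rw [h3, Nat.mul_add_mod]
    exact (Nat.mod_eq_of_lt hr).symm
  · rintro rfl
    refine ⟨by exact_mod_cast Nat.mod_le len gN, ?_⟩
    refine ⟨((len / gN : Nat) : Int), ?_⟩
    have h1 : gN * (len / gN) + len % gN = len := Nat.div_add_mod len gN
    have h2 := congrArg (fun n : Nat => (n : Int)) h1
    push_cast at h2 ⊢
    linarith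

-- ---- B-side per-class statistics: (min |x|, parity of negative count) ----
def bstep2 (st : Option (Int × Bool)) (x : Int) : Option (Int × Bool) :=
  match st with
  | some mp => some (min mp.1 |x|, xor mp.2 (decide (x < 0)))
  | none => some (|x|, decide (x < 0))

def bstat2 (l : List Int) : Option (Int × Bool) := l.foldl bstep2 none

def viewStat (st : Option (Int × Int × Int)) : Option (Int × Bool) :=
  st.map (fun v => (v.2.1, v.2.2 % 2 == 1))

theorem bstep2_view (st : Option (Int × Int × Int)) (hst : ∀ v, st = some v → 0 ≤ v.2.2) (x : Int) :
    bstep2 (viewStat st) x = viewStat (bstep st x) := by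
  match st with
  | none =>
      simp only [viewStat, bstep2, bstep, Option.map_some, Option.map_none]
      by_cases hx : x < 0
      · have h1 : ((1 : Int) % 2 == 1) = true := by decide
        simp [hx, h1]
      · have h0 : ((0 : Int) % 2 == 1) = false := by decide
        simp [hx, h0]
  | some (t, mn, neg) =>
      have hneg : 0 ≤ neg := by simpa using hst (t, mn, neg) rfl
      simp only [viewStat, bstep2, bstep, Option.map_some]
      refine congrArg some (Prod.ext rfl ?_)
      simp only
      by_cases hx : x < 0
      · by_cases hodd : neg % 2 = 1
        · have h2 : (neg + 1) % 2 = 0 := by omega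
          simp [hx, hodd, h2]
        · have h1 : neg % 2 = 0 := by omega
          have h2 : (neg + 1) % 2 = 1 := by omega
          simp [hx, h1, h2]
      · by_cases hodd : neg % 2 = 1
        · simp [hx, hodd]
        · have h1 : neg % 2 = 0 := by omega
          simp [hx, h1]

theorem bstep_nonneg (st : Option (Int × Int × Int)) (hst : ∀ v, st = some v → 0 ≤ v.2.2)
    (x : Int) : ∀ v, bstep st x = some v → 0 ≤ v.2.2 := by
  match st with
  | none => intro v hv; simp [bstep] at hv; subst hv; split_ifs <;> simp
  | some (t, mn, neg) =>
      intro v hv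
      have h2 : 0 ≤ neg := by simpa using hst (t, mn, neg) rfl
      simp [bstep] at hv; subst hv; simp; split_ifs <;> omega

theorem bstat2_eq_view_aux (l : List Int) (st : Option (Int × Int × Int))
    (hst : ∀ v, st = some v → 0 ≤ v.2.2) :
    l.foldl bstep2 (viewStat st) = viewStat (l.foldl bstep st) := by
  induction l generalizing st with
  | nil => rfl
  | cons x l ih =>
      simp only [List.foldl_cons, bstep2_view st hst x]
      exact ih _ (bstep_nonneg st hst x)

theorem bstat2_eq_view (l : List Int) : bstat2 l = viewStat (absStat l) :=
  bstat2_eq_view_aux l none (by intro v h; simp at h)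

-- the fold from a `some` state stays `some`
theorem bstep_some (l : List Int) (s : Int × Int × Int) :
    ∃ v, l.foldl bstep (some s) = some v := by
  induction l generalizing s with
  | nil => exact ⟨s, rfl⟩
  | cons x l ih => obtain ⟨s', _⟩ := s; exact ih _

-- sum-of-|x| component of absStat
def sumAbs (l : List Int) : Int := l.foldl (fun s x => s + |x|) 0

theorem sumAbs_foldl (l : List Int) (s : Int) :
    l.foldl (fun s x => s + |x|) s = s + sumAbs l := by
  induction l generalizing s with
  | nil => simp [sumAbs]
  | cons x l ih =>
      simp only [List.foldl_cons, sumAbs]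
      rw [ih (s + |x|), ih (0 + |x|)]
      ring

theorem sumAbs_cons (x : Int) (l : List Int) : sumAbs (x :: l) = |x| + sumAbs l := by
  show List.foldl (fun s x => s + |x|) (0 + |x|) l = |x| + sumAbs l
  rw [sumAbs_foldl]
  ring

theorem absStat_fst (l : List Int) : (absStat l).elim 0 (·.1) = sumAbs l := by
  have aux : ∀ (l : List Int) (s : Int × Int × Int),
      (l.foldl bstep (some s)).elim 0 (·.1) = s.1 + sumAbs l := by
    intro l
    induction l with
    | nil => intro s; simp [sumAbs]
    | cons y l ih =>
        intro s
        obtain ⟨t, mn, neg⟩ := s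
        simp only [List.foldl_cons, bstep, ih, sumAbs_cons]
        ring
  rcases l with _ | ⟨x, l⟩
  · rfl
  · rw [absStat, List.foldl_cons,
      show bstep none x = some (|x|, |x|, if x < 0 then 1 else 0) from rfl, aux, sumAbs_cons]

theorem sumAbs_append_singleton (l : List Int) (x : Int) :
    sumAbs (l ++ [x]) = sumAbs l + |x| := by
  simp [sumAbs, List.foldl_append]

-- ---- B's dict after the bucketing pass, characterized ----
def statsDict (g : Int) (a : List Int) : PySem.Dict Int (Int × Bool) :=
  (PySem.List.enumerate a 0).foldl
    (fun (stats : PySem.Dict Int (Int × Bool)) (ix : Int × Int) =>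
      let r := PySem.Int.mod ix.1 g
      match PySem.Dict.get? stats r with
      | some mp => PySem.Dict.insert stats r ((min mp.1 |ix.2| : Int), xor mp.2 (decide (ix.2 < 0)))
      | none => PySem.Dict.insert stats r ((|ix.2| : Int), decide (ix.2 < 0)))
    PySem.Dict.empty

def classVal (a : List Int) (g : Int) (r : Int) : Int × Bool :=
  (bstat2 (gatherA a g r)).getD (0, false)

theorem bstat2_append (l : List Int) (x : Int) : bstat2 (l ++ [x]) = bstep2 (bstat2 l) x := by
  simp [bstat2, List.foldl_append, bstep2]

theorem bstat2_some (l : List Int) (h : l ≠ []) : ∃ v, bstat2 l = some v := by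
  have aux : ∀ (l : List Int) (v : Int × Bool), ∃ w, l.foldl bstep2 (some v) = some w := by
    intro l
    induction l with
    | nil => exact fun v => ⟨v, rfl⟩
    | cons y l ih => intro v; simpa [bstep2] using ih _
  rcases l with _ | ⟨y, l⟩
  · exact absurd rfl h
  · simpa [bstat2, bstep2] using aux l _

theorem gather_cons (a : List Int) (g r : Int) (hg : 0 < g) (hr : r < (a.length : Int)) :
    gatherA a g r = PySem.List.pyGetD a r 0 :: gatherA a g (r + g) := by
  rw [gatherA, dif_pos ⟨hr, hg⟩]

-- appending x to a changes exactly the class of residue (len a) % g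
theorem gather_append_mod (g : Int) (hg : 0 < g) (a : List Int) (x : Int) (r : Int)
    (hr1 : 0 ≤ r) (hr2 : r < g) :
    gatherA (a ++ [x]) g r
    = if r = ((a.length % g.toNat : Nat) : Int) then gatherA a g r ++ [x] else gatherA a g r := by
  rw [gather_append a x g hg r hr1]
  have hgn : g = (g.toNat : Int) := by omega
  have hmc := mod_cond_iff g.toNat a.length r.toNat (by omega) (by omega)
  rw [show ((r.toNat : Int)) = r from by omega] at hmc
  by_cases hc : r = ((a.length % g.toNat : Nat) : Int)
  · rw [if_pos (by rw [hgn] at hr2 ⊢; exact hmc.2 (by omega)), if_pos hc]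
  · rw [if_neg (fun hx => hc (by rw [hgn] at hx; have := hmc.1 hx; omega)), if_neg hc]
    simp

theorem keys_of_items_map (d : PySem.Dict Int (Int × Bool)) (l : List Int) (f : Int → Int × Bool)
    (h : d.items = l.map (fun r => (r, f r))) : d.keys = l := by
  simp only [PySem.Dict.keys, h, List.map_map]
  exact List.map_id' l

theorem statsDict_append (g : Int) (a : List Int) (x : Int) :
    statsDict g (a ++ [x])
    = (match PySem.Dict.get? (statsDict g a) (PySem.Int.mod (a.length : Int) g) with
       | some mp => PySem.Dict.insert (statsDict g a) (PySem.Int.mod (a.length : Int) g)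
           ((min mp.1 |x| : Int), xor mp.2 (decide (x < 0)))
       | none => PySem.Dict.insert (statsDict g a) (PySem.Int.mod (a.length : Int) g)
           ((|x| : Int), decide (x < 0))) := by
  rw [statsDict, PySem.List.enumerate_append, PySem.List.enumerate_cons,
    PySem.List.enumerate_nil, List.foldl_append, List.foldl_cons, List.foldl_nil, ← statsDict]
  norm_num

theorem statsDict_items (g : Int) (hg : 0 < g) (a : List Int) :
    (statsDict g a).items
    = (PySem.List.pyRange 0 (min g (a.length : Int)) 1).map (fun r => (r, classVal a g r)) := by
  induction a using List.reverseRecOn with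
  | nil =>
      rw [show ((List.length ([] : List Int) : Int)) = 0 from by simp,
        PySem.List.pyRange_one_eq_nil (by omega : min g 0 ≤ 0)]
      rfl
  | append_singleton a x ih =>
      have hgn : g = (g.toNat : Int) := by omega
      have hn1 : (((a ++ [x]).length : Nat) : Int) = (a.length : Int) + 1 := by
        simp
      rw [statsDict_append]
      have hmod : PySem.Int.mod ((a.length : Nat) : Int) g = ((a.length % g.toNat : Nat) : Int) := by
        conv_lhs => rw [hgn]
        exact PySem.Int.mod_natCast a.length g.toNat
      have hkeys : (statsDict g a).keys = PySem.List.pyRange 0 (min g (a.length : Int)) 1 :=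
        keys_of_items_map _ _ _ ih
      by_cases hsmall : (a.length : Int) < g
      · -- new residue class: the dict appends a fresh key at the end
        have hr0 : ((a.length % g.toNat : Nat) : Int) = (a.length : Int) := by
          have : a.length % g.toNat = a.length := Nat.mod_eq_of_lt (by omega)
          rw [this]
        have hget : PySem.Dict.get? (statsDict g a) (PySem.Int.mod ((a.length : Nat) : Int) g) = none := by
          rw [hmod, hr0, PySem.Dict.get?_eq_none_iff_not_mem_keys, hkeys]
          intro hmem
          have := PySem.List.mem_pyRange_one.1 hmem
          omega
        rw [hget]
        have hcont : (statsDict g a).contains ((a.length : Int)) = false := by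
          rw [PySem.Dict.contains_eq_decide_mem_keys, hkeys, decide_eq_false_iff_not]
          intro hmem
          have := PySem.List.mem_pyRange_one.1 hmem
          omega
        rw [hmod, hr0, PySem.Dict.items_insert, hcont, if_neg (by simp), ih, hn1,
          show min g ((a.length : Int)) = (a.length : Int) from by omega,
          show min g ((a.length : Int) + 1) = (a.length : Int) + 1 from by omega,
          PySem.List.pyRange_one_succ_right (by omega : (0 : Int) ≤ (a.length : Int)),
          List.map_append]
        congr 1
        · refine List.map_congr_left (fun r hr => ?_)
          obtain ⟨hr1, hr2⟩ := PySem.List.mem_pyRange_one.1 hr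
          have := gather_append_mod g hg a x r hr1 (by omega)
          rw [hr0] at this
          rw [classVal, classVal, this, if_neg (by omega)]
        · have := gather_append_mod g hg a x (a.length : Int) (by omega) (by omega)
          rw [hr0, if_pos rfl, gather_big a g _ (le_refl _)] at this
          simp [classVal, this, bstat2, bstep2]
      · -- existing residue class: the dict updates the value in place
        have hkg : min g ((a.length : Int)) = g := by omega
        have hr0b : 0 ≤ ((a.length % g.toNat : Nat) : Int) ∧ ((a.length % g.toNat : Nat) : Int) < g := by
          have : a.length % g.toNat < g.toNat := Nat.mod_lt _ (by omega)
          omega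
        obtain ⟨mp, hmp⟩ : ∃ v, bstat2 (gatherA a g ((a.length % g.toNat : Nat) : Int)) = some v := by
          refine bstat2_some _ ?_
          rw [gather_cons a g _ hg (by omega)]
          simp
        have hcv : classVal a g ((a.length % g.toNat : Nat) : Int) = mp := by
          simp only [classVal, hmp, Option.getD_some]
        have hmem : (((a.length % g.toNat : Nat) : Int), mp) ∈ (statsDict g a).items := by
          rw [ih, hkg]
          exact List.mem_map.2 ⟨_, PySem.List.mem_pyRange_one.2 (by omega), by rw [hcv]⟩
        have hnodup : (statsDict g a).keys.Nodup := by
          rw [hkeys]; exact PySem.List.nodup_pyRange_one 0 _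
        have hget : PySem.Dict.get? (statsDict g a) (PySem.Int.mod ((a.length : Nat) : Int) g) = some mp := by
          rw [hmod]; exact PySem.Dict.get?_of_mem_items _ hmem hnodup
        rw [hget]
        have hcont : (statsDict g a).contains (((a.length % g.toNat : Nat) : Int)) = true := by
          rw [PySem.Dict.contains_eq_decide_mem_keys, hkeys, hkg, decide_eq_true_iff]
          exact PySem.List.mem_pyRange_one.2 (by omega)
        rw [hmod, PySem.Dict.items_insert, hcont, if_pos rfl, ih, hkg, hn1,
          show min g ((a.length : Int) + 1) = g from by omega, List.map_map]
        refine List.map_congr_left (fun r hr => ?_)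
        obtain ⟨hr1, hr2⟩ := PySem.List.mem_pyRange_one.1 hr
        have hgam := gather_append_mod g hg a x r hr1 hr2
        by_cases hc : r = ((a.length % g.toNat : Nat) : Int)
        · subst hc
          simp only [Function.comp_apply, BEq.rfl, if_true]
          rw [classVal, hgam, if_pos rfl, bstat2_append, hmp]
          simp [bstep2, hcv]
        · have hbeq : (r == ((a.length % g.toNat : Nat) : Int)) = false := by
            simpa using hc
          simp only [Function.comp_apply, hbeq, Bool.false_eq_true, if_false]
          rw [classVal, classVal, hgam, if_neg hc]

-- ---- penalty fold over a list of (min, parity) values ----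
def penOdd (vs : List (Int × Bool)) : Int := ((vs.filter (·.2)).map (·.1)).sum
def penEven (vs : List (Int × Bool)) : Int := ((vs.filter (fun v => !v.2)).map (·.1)).sum

theorem pens_fold (vs : List (Int × Bool)) (p1 p2 : Int) :
    vs.foldl (fun (p : Int × Int) mp => if mp.2 then (p.1 + mp.1, p.2) else (p.1, p.2 + mp.1)) (p1, p2)
    = (p1 + penOdd vs, p2 + penEven vs) := by
  induction vs generalizing p1 p2 with
  | nil => simp [penOdd, penEven]
  | cons v vs ih =>
      rcases v with ⟨mn, par⟩
      cases par <;> simp only [List.foldl_cons, if_true, if_false, Bool.false_eq_true, ite_false, ite_true, ih] <;>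
        simp [penOdd, penEven, List.filter_cons] <;> ring

-- ---- A's combining fold over nonempty classes, in penalty form ----
theorem afold_pens (a : List Int) (g : Int) (rs : List Int)
    (h : ∀ r ∈ rs, gatherA a g r ≠ []) (t0 t1 : Int) :
    rs.foldl (fun (st : Int × Option Int) i =>
        let xy := consecA (gatherA a g i)
        (st.1 + xy.1, st.2.bind (fun t => xy.2.map (fun y => t + y)))) (t0, some t1)
    = (t0 + (rs.map (fun r => sumAbs (gatherA a g r))).sum - 2 * penOdd (rs.map (classVal a g)),
       some (t1 + (rs.map (fun r => sumAbs (gatherA a g r))).sum - 2 * penEven (rs.map (classVal a g)))) := by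
  induction rs generalizing t0 t1 with
  | nil => simp [penOdd, penEven]
  | cons r rs ih =>
      have hne : gatherA a g r ≠ [] := h r List.mem_cons_self
      obtain ⟨v, hv⟩ : ∃ v, absStat (gatherA a g r) = some v := by
        rcases hgl : gatherA a g r with _ | ⟨y, l⟩
        · exact absurd hgl hne
        · simpa [absStat, bstep] using bstep_some l _
      obtain ⟨t, mn, neg⟩ := v
      have ht : t = sumAbs (gatherA a g r) := by
        have := absStat_fst (gatherA a g r); rw [hv] at this; simpa using this
      have hcv : classVal a g r = (mn, neg % 2 == 1) := by
        simp [classVal, bstat2_eq_view, hv, viewStat]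
      have hc : consecA (gatherA a g r) = combineA (some (t, mn, neg)) := by
        rw [consecA_eq, hv]
      by_cases hpar : (neg % 2 == 0) = true
      · have hpar1 : (neg % 2 == 1) = false := by
          have h0 : neg % 2 = 0 := by simpa using hpar
          simp [h0]
        simp only [List.foldl_cons, hc, combineA, if_pos hpar, Option.bind_some, Option.map_some,
          List.map_cons, hcv]
        rw [ih (fun r hr => h r (List.mem_cons_of_mem _ hr))]
        simp [penOdd, penEven, List.filter_cons, hpar1, ht]
        constructor <;> ring
      · have hpar1 : (neg % 2 == 1) = true := by
          have h0 : ¬ neg % 2 = 0 := by simpa using hpar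
          have h1 : neg % 2 = 1 := by omega
          simp [h1]
        simp only [List.foldl_cons, hc, combineA, if_neg hpar, Option.bind_some, Option.map_some,
          List.map_cons, hcv]
        rw [ih (fun r hr => h r (List.mem_cons_of_mem _ hr))]
        simp [penOdd, penEven, List.filter_cons, hpar1, ht]
        constructor <;> ring

-- A's loop over the empty classes r ∈ [len a, g)
theorem tailfold (g : Int) (a : List Int) (rs : List Int) :
    ∀ t : Int, ∀ o : Option Int,
    (∀ r ∈ rs, (a.length : Int) ≤ r) →
    rs.foldl (fun (st : Int × Option Int) i =>
        let xy := consecA (gatherA a g i)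
        (st.1 + xy.1, st.2.bind (fun t => xy.2.map (fun y => t + y)))) (t, o)
    = (t, if rs.isEmpty then o else none) := by
  induction rs with
  | nil => simp
  | cons r rs ih =>
      intro t o h
      have hg : gatherA a g r = [] := gather_big a g r (h r List.mem_cons_self)
      have hc : consecA ([] : List Int) = (0, none) := rfl
      simp only [List.foldl_cons, hg, hc]
      rw [ih _ _ (fun r hr => h r (List.mem_cons_of_mem _ hr))]
      simp

-- ---- partition: per-class sums of |x| add up to the global sum ----
theorem sum_map_update {α : Type} [DecidableEq α] (l : List α) (f f' : α → Int) (r0 : α) (c : Int)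
    (hf : ∀ r ∈ l, f' r = if r = r0 then f r + c else f r) :
    (l.map f').sum = (l.map f).sum + c * (l.count r0) := by
  induction l with
  | nil => simp
  | cons r l ih =>
      have hr := hf r List.mem_cons_self
      rw [List.map_cons, List.map_cons, List.sum_cons, List.sum_cons,
        ih (fun r hr => hf r (List.mem_cons_of_mem _ hr)), List.count_cons, hr]
      by_cases h : r = r0
      · subst h
        simp only [BEq.rfl, if_true]
        push_cast; ring
      · rw [if_neg h, if_neg (by simpa using h)]
        push_cast; ring

theorem partition_sum (g : Int) (hg : 0 < g) (a : List Int) :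
    ((PySem.List.pyRange 0 g 1).map (fun r => sumAbs (gatherA a g r))).sum = sumAbs a := by
  induction a using List.reverseRecOn with
  | nil =>
      have : ∀ r ∈ PySem.List.pyRange 0 g 1, sumAbs (gatherA ([] : List Int) g r) = 0 := by
        intro r hr
        rw [gather_big ([] : List Int) g r (by simp; exact (PySem.List.mem_pyRange_one.1 hr).1)]
        rfl
      rw [List.map_congr_left (fun r hr => this r hr)]
      simp [sumAbs]
  | append_singleton a x ih =>
      have hgn : g = (g.toNat : Int) := by omega
      set r0 : Int := ((a.length % g.toNat : Nat) : Int) with hr0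
      have hr0mem : r0 ∈ PySem.List.pyRange 0 g 1 := by
        rw [PySem.List.mem_pyRange_one]
        have : a.length % g.toNat < g.toNat := Nat.mod_lt _ (by omega)
        omega
      have hcount : (PySem.List.pyRange 0 g 1).count r0 = 1 :=
        le_antisymm (List.nodup_iff_count_le_one.1 (PySem.List.nodup_pyRange_one 0 g) r0)
          (List.count_pos_iff.2 hr0mem)
      have hupd : ∀ r ∈ PySem.List.pyRange 0 g 1,
          sumAbs (gatherA (a ++ [x]) g r)
          = if r = r0 then sumAbs (gatherA a g r) + |x| else sumAbs (gatherA a g r) := by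
        intro r hr
        obtain ⟨hr1, hr2⟩ := PySem.List.mem_pyRange_one.1 hr
        rw [gather_append a x g hg r hr1]
        have hiff : ((r ≤ (a.length : Int)) ∧ g ∣ ((a.length : Int) - r)) ↔ r = r0 := by
          rw [hgn]
          have hmc := mod_cond_iff g.toNat a.length r.toNat (by omega) (by omega)
          rw [show ((r.toNat : Int)) = r from by omega] at hmc
          constructor
          · intro hx; have := hmc.1 hx; omega
          · intro hx; exact hmc.2 (by omega)
        by_cases hc : r = r0
        · rw [if_pos (hiff.2 hc), if_pos hc, sumAbs_append_singleton]
        · rw [if_neg (fun hx => hc (hiff.1 hx)), if_neg hc]; simp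
      rw [sum_map_update _ _ _ r0 |x| hupd, hcount, ih, sumAbs_append_singleton]
      push_cast; ring

-- ===== VERDICT (by name: the statement is the Claim_ definition above) =====
theorem max_possible_sum_spec : Claim_equal_max_possible_sum := by
  intro a B _ hPre
  obtain ⟨hB, hPre2⟩ := hPre
  unfold Spec_max_possible_sum
  simp only [max_possible_sum, max_possible_sum_alt]
  rw [gcdFold_A]
  rw [show (List.foldl (fun g b => (Int.gcd g b : Int)) (B.headD 0) B.tail) = gcdFold B from rfl]
  simp only [PySem.List.len_eq]
  set g : Int := gcdFold B with hgdef
  by_cases hg1 : g == 1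
  · rw [if_pos hg1, if_pos hg1]
  · rw [if_neg hg1, if_neg hg1]
    have hsd : (PySem.List.enumerate a 0).foldl
        (fun (stats : PySem.Dict Int (Int × Bool)) (ix : Int × Int) =>
          let r := PySem.Int.mod ix.1 g
          match PySem.Dict.get? stats r with
          | some mp => PySem.Dict.insert stats r ((min mp.1 |ix.2| : Int), xor mp.2 (decide (ix.2 < 0)))
          | none => PySem.Dict.insert stats r ((|ix.2| : Int), decide (ix.2 < 0)))
        PySem.Dict.empty = statsDict g a := rfl
    rw [hsd]
    by_cases hgpos : 0 < g
    · -- main case: 0 < g, g ≠ 1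
      set nI : Int := (a.length : Int) with hnI
      set k : Int := min g nI with hkdef
      have hk0 : 0 ≤ k := by positivity
      have hkg : k ≤ g := min_le_left _ _
      have hvals : (statsDict g a).values = (PySem.List.pyRange 0 k 1).map (classVal a g) := by
        simp only [PySem.Dict.values, statsDict_items g hgpos a, List.map_map]
        rfl
      rw [hvals, pens_fold]
      rw [PySem.List.pyRange_one_append 0 k g hk0 hkg, List.foldl_append]
      rw [afold_pens a g (PySem.List.pyRange 0 k 1)
        (fun r hr => by
          obtain ⟨h1, h2⟩ := PySem.List.mem_pyRange_one.1 hr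
          rw [gather_cons a g r hgpos (by omega)]
          simp) 0 0]
      have hT : ((PySem.List.pyRange 0 g 1).map (fun r => sumAbs (gatherA a g r))).sum
          = sumAbs a := partition_sum g hgpos a
      rw [PySem.List.pyRange_one_append 0 k g hk0 hkg, List.map_append, List.sum_append] at hT
      have htail0 : ((PySem.List.pyRange k g 1).map (fun r => sumAbs (gatherA a g r))).sum = 0 := by
        by_cases hkg' : k = g
        · rw [hkg', PySem.List.pyRange_one_eq_nil (le_refl g)]; rfl
        · have hkn : k = nI := by omega
          have : ∀ r ∈ PySem.List.pyRange k g 1, sumAbs (gatherA a g r) = 0 := by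
            intro r hr
            obtain ⟨h1, h2⟩ := PySem.List.mem_pyRange_one.1 hr
            rw [gather_big a g r (by omega)]
            rfl
          rw [List.map_congr_left this]
          simp
      have hTk : ((PySem.List.pyRange 0 k 1).map (fun r => sumAbs (gatherA a g r))).sum
          = sumAbs a := by omega
      have hS : a.foldl (fun s x => s + |x|) 0 = sumAbs a := rfl
      by_cases hkg' : k = g
      · -- no empty classes: g ≤ n
        rw [show PySem.List.pyRange k g 1 = [] from PySem.List.pyRange_one_eq_nil (by omega)]
        simp only [List.foldl_nil]
        rw [if_neg (by omega : ¬ g > nI)]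
        rw [hTk, hS]
        rw [max_def, min_def]
        split_ifs <;> omega
      · -- k = n < g: at least one empty class forces A's tot1 to -inf and B's g > n branch
        have hkn : k = nI := by omega
        rw [tailfold g a _ _ _ (fun r hr => by
          have := PySem.List.mem_pyRange_one.1 hr; omega)]
        have hne : ¬ (PySem.List.pyRange k g 1).isEmpty := by
          rw [PySem.List.pyRange_one_cons (by omega : k < g)]; simp
        rw [if_neg hne, if_pos (by omega : g > nI)]
        rw [hTk, hS]
        ring
    · -- a = [] and g ≤ 0: both sides return 0
      have ha : a = [] := by
        rcases hPre2 with h | h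
        · exact h
        · exact absurd (gcdFold_pos B hB h) hgpos
      subst ha
      rw [show PySem.List.pyRange 0 g 1 = [] from PySem.List.pyRange_one_eq_nil (by omega)]
      rw [show statsDict g [] = PySem.Dict.empty from rfl]
      rw [show (PySem.Dict.empty : PySem.Dict Int (Int × Bool)).values = [] from rfl]
      simp only [List.foldl_nil, List.length_nil, Nat.cast_zero]
      rw [if_neg (by omega : ¬ g > (0 : Int))]
      norm_num
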